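-- pv_equiv track=rewrite | github.com/flo-kei/ccc-40 | level5/c5.py | place_vertical_tables
-- ===== SOURCE A (Python) =====
-- def place_vertical_tables(matrix,x,y,z,currX,currY,deskindex):
--     currY = 0
--     while currY+2 < y:
--         for j in range(0,2):
--             if(currY >= y):
--                 break
--             matrix[currY][currX] = 1
--             currY+=1
--         currY+=1
--
--         deskindex+=1
--
--     return matrix,x,y,z,currX,currY,deskindex
-- ===== SOURCE B (Python) =====
-- def place_vertical_tables(matrix, x, y, z, currX, currY, deskindex):
--     n = max(y, 0) // 3
--     for r, row in enumerate(matrix):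
--         if r < 3 * n and r % 3 != 2:
--             row[currX] = 1
--     return matrix, x, y, z, currX, 3 * n, deskindex + n
-- ===== Notes on version B (the rewrite author's own statement) =====
-- stated objective: simpler
-- what changed: Instead of A's while-loop that walks groups of rows with three mutable counters and a break-guarded inner for, B computes the group count n = max(y,0)//3 in closed form and makes one pass over the matrix rows, marking row r by the arithmetic pattern r < 3n and r % 3 != 2; currY and deskindex come from n directly.
import Mathlib
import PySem

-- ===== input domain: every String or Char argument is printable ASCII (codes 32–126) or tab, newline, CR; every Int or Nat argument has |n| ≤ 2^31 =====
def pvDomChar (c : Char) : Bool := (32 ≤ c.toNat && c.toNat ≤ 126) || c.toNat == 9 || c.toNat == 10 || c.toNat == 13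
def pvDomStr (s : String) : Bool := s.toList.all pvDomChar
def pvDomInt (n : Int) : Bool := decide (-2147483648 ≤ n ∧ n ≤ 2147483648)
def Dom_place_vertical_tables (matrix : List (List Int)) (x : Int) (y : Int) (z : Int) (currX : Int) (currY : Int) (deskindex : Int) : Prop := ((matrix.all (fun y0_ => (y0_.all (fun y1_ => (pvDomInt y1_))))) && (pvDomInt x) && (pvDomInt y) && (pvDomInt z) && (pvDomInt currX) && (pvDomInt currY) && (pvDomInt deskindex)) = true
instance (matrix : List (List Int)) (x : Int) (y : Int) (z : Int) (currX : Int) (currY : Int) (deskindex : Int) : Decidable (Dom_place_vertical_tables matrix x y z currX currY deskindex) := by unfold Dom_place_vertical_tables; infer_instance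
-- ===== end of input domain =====

-- B drops A's while-loop bookkeeping entirely: it computes the number of groups n = max(y,0)//3 in
-- closed form and makes ONE pass over the matrix rows, marking row r iff r < 3n and r % 3 != 2
-- (simpler decomposition; equivalence is about the return value — both Pythons mutate `matrix` in place).

-- ===== PORT A =====
-- matrix[r][currX] = 1 (Python IndexError on out-of-range → excluded by Pre_; pySetD/pyGetD are exact in range)
def pvWrite (m : List (List Int)) (r cx : Int) : List (List Int) :=
  PySem.List.pySetD m r (PySem.List.pySetD (PySem.List.pyGetD m r []) cx 1)

-- the inner `for j in range(0, 2)` with its `break`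
def pvInnerA (js : List Int) (m : List (List Int)) (y cx cy : Int) : List (List Int) × Int :=
  match js with
  | [] => (m, cy)
  | _ :: js => if cy ≥ y then (m, cy) else pvInnerA js (pvWrite m cy cx) y cx (cy + 1)

theorem pvInnerA_le (js : List Int) (m : List (List Int)) (y cx cy : Int) :
    cy ≤ (pvInnerA js m y cx cy).2 := by
  induction js generalizing m cy with
  | nil => simp [pvInnerA]
  | cons j js ih =>
    simp only [pvInnerA]
    split
    · simp
    · exact le_trans (by omega) (ih _ _)

-- the outer `while currY+2 < y`
def pvLoopA (m : List (List Int)) (y cx cy di : Int) : List (List Int) × Int × Int :=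
  if h : cy + 2 < y then
    let p := pvInnerA (PySem.List.pyRange 0 2 1) m y cx cy
    pvLoopA p.1 y cx (p.2 + 1) (di + 1)
  else (m, cy, di)
termination_by (y - cy).toNat
decreasing_by
  have := pvInnerA_le (PySem.List.pyRange 0 2 1) m y cx cy
  omega

def place_vertical_tables (matrix : List (List Int)) (x : Int) (y : Int) (z : Int) (currX : Int) (currY : Int) (deskindex : Int) : List (List Int) × Int × Int × Int × Int × Int × Int :=
  let r := pvLoopA matrix y currX 0 deskindex
  (r.1, x, y, z, currX, r.2.1, r.2.2)

-- ===== PORT B =====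
-- Source B: n = max(y,0)//3; for r,row in enumerate(matrix): if r < 3n and r%3 != 2: row[currX] = 1
def place_vertical_tables_alt (matrix : List (List Int)) (x : Int) (y : Int) (z : Int) (currX : Int) (currY : Int) (deskindex : Int) : List (List Int) × Int × Int × Int × Int × Int × Int :=
  let n : Int := PySem.Int.floordiv (max y 0) 3
  let m := (PySem.List.enumerate matrix 0).map
    (fun p => if p.1 < 3 * n ∧ PySem.Int.mod p.1 3 ≠ 2 then PySem.List.pySetD p.2 currX 1 else p.2)
  (m, x, y, z, currX, 3 * n, deskindex + n)

-- ===== PRECONDITION & SPEC =====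
-- Pre_ = exactly the inputs where the Python A returns normally, in closed form: with n = max(y,0)//3
-- groups, every touched row index (the rows r < 3n with r % 3 ≠ 2, i.e. up to 3n-2) exists, and in each
-- touched row the column index currX is in range (Python indexing, negative indices allowed);
-- otherwise A raises IndexError.
def Pre_place_vertical_tables (matrix : List (List Int)) (x : Int) (y : Int) (z : Int) (currX : Int) (currY : Int) (deskindex : Int) : Prop :=
  ((max y 0) / 3 = 0 ∨ 3 * ((max y 0) / 3) - 2 < (matrix.length : Int)) ∧
  ∀ k < matrix.length,
    ((k : Int) < 3 * ((max y 0) / 3) ∧ k % 3 ≠ 2 →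
      PySem.Raise.InRange (matrix.getD k []).length currX)
instance (matrix : List (List Int)) (x : Int) (y : Int) (z : Int) (currX : Int) (currY : Int) (deskindex : Int) : Decidable (Pre_place_vertical_tables matrix x y z currX currY deskindex) := by unfold Pre_place_vertical_tables; infer_instance

def pvWitness_place_vertical_tables : List (List Int) × Int × Int × Int × Int × Int × Int :=
  ([[0], [0]], 0, 3, 0, 0, 0, 0)

def Spec_place_vertical_tables (matrix : List (List Int)) (x : Int) (y : Int) (z : Int) (currX : Int) (currY : Int) (deskindex : Int) (out : List (List Int) × Int × Int × Int × Int × Int × Int) : Prop := out = place_vertical_tables_alt matrix x y z currX currY deskindex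
instance (matrix : List (List Int)) (x : Int) (y : Int) (z : Int) (currX : Int) (currY : Int) (deskindex : Int) (out : List (List Int) × Int × Int × Int × Int × Int × Int) : Decidable (Spec_place_vertical_tables matrix x y z currX currY deskindex out) := by unfold Spec_place_vertical_tables; infer_instance

-- ===== CLAIM (what is proved, stated in full; the proofs are below) =====
def Claim_equal_place_vertical_tables : Prop := ∀ (matrix : List (List Int)) (x : Int) (y : Int) (z : Int) (currX : Int) (currY : Int) (deskindex : Int), Dom_place_vertical_tables matrix x y z currX currY deskindex → Pre_place_vertical_tables matrix x y z currX currY deskindex → Spec_place_vertical_tables matrix x y z currX currY deskindex (place_vertical_tables matrix x y z currX currY deskindex)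

-- ===== LEMMAS AND PROOFS =====

theorem pyRange3_nil (a b : Int) (h : b ≤ a) : PySem.List.pyRange a b 3 = [] := by
  rw [PySem.List.pyRange_of_pos a b (by norm_num)]
  rw [if_neg (by omega)]
  simp

theorem pyRange3_cons (a b : Int) (h : a < b) :
    PySem.List.pyRange a b 3 = a :: PySem.List.pyRange (a + 3) b 3 := by
  rw [PySem.List.pyRange_of_pos a b (by norm_num),
      PySem.List.pyRange_of_pos (a + 3) b (by norm_num)]
  rw [if_pos h]
  have hc : ((b - a + 3 - 1) / 3).toNat
      = (if a + 3 < b then ((b - (a + 3) + 3 - 1) / 3).toNat else 0) + 1 := by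
    split_ifs <;> omega
  rw [hc, List.range_succ_eq_map, List.map_cons, List.map_map]
  congr 1
  · simp
  · refine List.map_congr_left ?_
    intro k _
    simp only [Function.comp_apply]
    push_cast
    ring

theorem pvInnerA_run (m : List (List Int)) (y cx cy : Int) (h : cy + 2 ≤ y) :
    pvInnerA (PySem.List.pyRange 0 2 1) m y cx cy
      = (pvWrite (pvWrite m cy cx) (cy + 1) cx, cy + 1 + 1) := by
  have hr : PySem.List.pyRange 0 2 1 = [0, 1] := by decide
  rw [hr]
  simp only [pvInnerA]
  rw [if_neg (by omega), if_neg (by omega)]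

theorem pvLoopA_eq (y cx : Int) (n : Nat) : ∀ (m : List (List Int)) (cy di : Int),
    (y - cy).toNat = n →
    pvLoopA m y cx cy di
      = ((PySem.List.pyRange cy (y - 2) 3).foldl
            (fun m s => pvWrite (pvWrite m s cx) (s + 1) cx) m,
         cy + 3 * ((PySem.List.pyRange cy (y - 2) 3).length : Int),
         di + ((PySem.List.pyRange cy (y - 2) 3).length : Int)) := by
  induction n using Nat.strong_induction_on with
  | _ n ih =>
    intro m cy di hn
    rw [pvLoopA]
    by_cases h : cy + 2 < y
    · rw [dif_pos h]
      simp only [pvInnerA_run m y cx cy (by omega)]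
      have h3 : cy + 1 + 1 + 1 = cy + 3 := by ring
      rw [h3, ih ((y - (cy + 3)).toNat) (by omega) _ (cy + 3) (di + 1) rfl]
      rw [pyRange3_cons cy (y - 2) (by omega)]
      simp only [List.foldl_cons, List.length_cons, Prod.mk.injEq]
      refine ⟨trivial, by push_cast; ring, by push_cast; ring⟩
    · rw [dif_neg h]
      rw [pyRange3_nil cy (y - 2) (by omega)]
      simp

-- the starts list in closed map form
theorem pyRange3_zero_eq (y : Int) :
    PySem.List.pyRange 0 (y - 2) 3
      = (List.range ((max y 0) / 3).toNat).map (fun (k : Nat) => (3 : Int) * (k : Int)) := by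
  rw [PySem.List.pyRange_of_pos 0 (y - 2) (by norm_num)]
  by_cases h : (0 : Int) < y - 2
  · rw [if_pos h]
    have hc : ((y - 2 - 0 + 3 - 1) / 3).toNat = ((max y 0) / 3).toNat := by omega
    rw [hc]
    exact List.map_congr_left (fun k _ => by ring)
  · rw [if_neg h]
    have hz : ((max y 0) / 3).toNat = 0 := by omega
    simp [hz]

-- A's foldl over the starts, reindexed over List.range
def pvW (cx : Int) (m : List (List Int)) (n : Nat) : List (List Int) :=
  (List.range n).foldl
    (fun (m : List (List Int)) (k : Nat) =>
      pvWrite (pvWrite m ((3 : Int) * (k : Int)) cx) ((3 : Int) * (k : Int) + 1) cx) m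

theorem pvW_succ (cx : Int) (m : List (List Int)) (n : Nat) :
    pvW cx m (n + 1)
      = pvWrite (pvWrite (pvW cx m n) ((3 : Int) * (n : Int)) cx) ((3 : Int) * (n : Int) + 1) cx := by
  unfold pvW
  rw [List.range_succ, List.foldl_append, List.foldl_cons, List.foldl_nil]

theorem pvWrite_natCast (m : List (List Int)) (j : Nat) (cx : Int) :
    pvWrite m (j : Int) cx = m.set j (PySem.List.pySetD (m.getD j []) cx 1) := by
  simp [pvWrite]

theorem length_pvW (cx : Int) (m : List (List Int)) (n : Nat) :
    (pvW cx m n).length = m.length := by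
  induction n with
  | zero => rfl
  | succ n ih =>
    rw [pvW_succ]
    have h1 : ((3 : Int) * (n : Int)) = ((3 * n : Nat) : Int) := by push_cast; ring
    have h2 : ((3 : Int) * (n : Int) + 1) = ((3 * n + 1 : Nat) : Int) := by push_cast; ring
    rw [h2, h1, pvWrite_natCast, pvWrite_natCast]
    simpa using ih

theorem getElem?_pvW (cx : Int) (m : List (List Int)) (n : Nat) (k : Nat)
    (hk : k < m.length) :
    (pvW cx m n)[k]?
      = some (if k < 3 * n ∧ k % 3 ≠ 2 then PySem.List.pySetD (m[k]) cx 1 else m[k]) := by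
  induction n with
  | zero =>
    rw [if_neg (by omega)]
    exact List.getElem?_eq_getElem hk
  | succ n ih =>
    have hlen := length_pvW cx m n
    have h1 : ((3 : Int) * (n : Int)) = ((3 * n : Nat) : Int) := by push_cast; ring
    have h2 : ((3 : Int) * (n : Int) + 1) = ((3 * n + 1 : Nat) : Int) := by push_cast; ring
    rw [pvW_succ, h2, h1, pvWrite_natCast, pvWrite_natCast]
    set W := pvW cx m n with hW
    set v1 := PySem.List.pySetD (W.getD (3 * n) []) cx 1 with hv1
    set A1 := W.set (3 * n) v1 with hA1
    set v2 := PySem.List.pySetD (A1.getD (3 * n + 1) []) cx 1 with hv2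
    have hA1len : A1.length = m.length := by rw [hA1]; simp [hlen]
    rw [List.getElem?_set]
    by_cases hA : 3 * n + 1 = k
    · subst hA
      rw [if_pos rfl, if_pos (by omega)]
      have hv2' : v2 = PySem.List.pySetD (m[3 * n + 1]) cx 1 := by
        rw [hv2, hA1, List.getD_eq_getElem?_getD, List.getElem?_set,
            if_neg (by omega), ih, if_neg (by omega)]
        rfl
      rw [hv2', if_pos (by omega)]
    · rw [if_neg hA, hA1, List.getElem?_set]
      by_cases hB : 3 * n = k
      · subst hB
        rw [if_pos rfl, if_pos (by omega)]
        have hv1' : v1 = PySem.List.pySetD (m[3 * n]) cx 1 := by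
          rw [hv1, List.getD_eq_getElem?_getD, ih, if_neg (by omega)]
          rfl
        rw [hv1', if_pos (by omega)]
      · rw [if_neg hB, ih]
        by_cases hc : k < 3 * n ∧ k % 3 ≠ 2
        · rw [if_pos hc, if_pos (by omega)]
        · rw [if_neg hc, if_neg (by omega)]

-- ===== VERDICT (by name: the statement is the Claim_ definition above) =====
theorem place_vertical_tables_spec : Claim_equal_place_vertical_tables := by
  intro matrix x y z currX currY deskindex _ _
  unfold Spec_place_vertical_tables place_vertical_tables place_vertical_tables_alt
  rw [pvLoopA_eq y currX (y - 0).toNat matrix 0 deskindex rfl]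
  rw [pyRange3_zero_eq y]
  set nN : Nat := ((max y 0) / 3).toNat with hnN
  have hn : (nN : Int) = PySem.Int.floordiv (max y 0) 3 := by
    rw [PySem.Int.floordiv_eq_ediv_of_pos (by norm_num)]
    omega
  simp only [List.foldl_map, List.length_map, List.length_range]
  have hm : pvW currX matrix nN
      = (PySem.List.enumerate matrix 0).map
          (fun p => if p.1 < 3 * PySem.Int.floordiv (max y 0) 3 ∧ PySem.Int.mod p.1 3 ≠ 2
                    then PySem.List.pySetD p.2 currX 1 else p.2) := by
    apply List.ext_getElem?
    intro k
    by_cases hk : k < matrix.length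
    · rw [getElem?_pvW currX matrix nN k hk]
      rw [List.getElem?_map, PySem.List.getElem?_enumerate, List.getElem?_eq_getElem hk]
      simp only [Option.map_some, zero_add]
      have hmod : PySem.Int.mod (k : Int) 3 = ((k % 3 : Nat) : Int) := by
        exact_mod_cast PySem.Int.mod_natCast k 3
      by_cases hc : k < 3 * nN ∧ k % 3 ≠ 2
      · rw [if_pos hc, if_pos (by rw [← hn, hmod]; push_cast; omega)]
      · rw [if_neg hc, if_neg (by rw [← hn, hmod]; push_cast; omega)]
    · rw [List.getElem?_eq_none (by rw [length_pvW]; omega),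
          List.getElem?_eq_none (by simp [PySem.List.length_enumerate]; omega)]
  show (pvW currX matrix nN, x, y, z, currX, 0 + 3 * (nN : Int), deskindex + (nN : Int)) = _
  rw [hm, ← hn]
  norm_num
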